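-- pv_equiv track=rewrite | github.com/rgpalgrave/materialpredictor | orbit_search_generator.py | derive_stoichiometry
-- ===== SOURCE A (Python) =====
-- from typing import List, Dict, Optional, Any, Tuple, Union
-- from math import gcd
-- from functools import reduce
--
-- def gcd_list(numbers: List[int]) -> int:
--     """GCD of a list of integers."""
--     return reduce(gcd, numbers)
--
-- def derive_stoichiometry(
--     cations: List[Dict],
--     anion: Dict
-- ) -> Tuple[List[int], int]:
--     """
--     Balance charges to get smallest integer stoichiometric coefficients.
--
--     Args:
--         cations: List of {"element": str, "charge": int, "count": int (optional)}
--         anion: {"element": str, "charge": int}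
--
--     Returns:
--         (cation_coefficients, anion_coefficient) as smallest integers
--
--     Examples:
--         Sr(+2), Ti(+4), O(-2) → [1, 1], 3  (SrTiO3)
--         Cs(+1), Sn(+4), Br(-1) → [2, 1], 6  (Cs2SnBr6)
--     """
--     anion_charge_abs = abs(anion["charge"])
--
--     # Case 1: Counts explicitly provided
--     if all("count" in c for c in cations):
--         cation_counts = [c["count"] for c in cations]
--         total_positive = sum(c["count"] * c["charge"] for c in cations)
--
--         if total_positive <= 0:
--             raise ValueError("Total cation charge must be positive")
--         if total_positive % anion_charge_abs != 0:
--             raise ValueError(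
--                 f"Cannot balance charges: total cation charge {total_positive} "
--                 f"not divisible by anion charge magnitude {anion_charge_abs}"
--             )
--
--         anion_count = total_positive // anion_charge_abs
--
--         # Reduce to smallest integers
--         g = gcd_list(cation_counts + [anion_count])
--         return [c // g for c in cation_counts], anion_count // g
--
--     # Case 2: Derive from charges assuming given ratios (default 1:1:...)
--     # If some have counts and others don't, use the counts for those that have them
--     cation_ratios = []
--     for c in cations:
--         cation_ratios.append(c.get("count", 1))
--
--     # Calculate total positive charge with these ratios
--     total_positive = sum(r * c["charge"] for r, c in zip(cation_ratios, cations))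
--
--     if total_positive <= 0:
--         raise ValueError("Total cation charge must be positive")
--
--     # Find minimum scale factor to make anion count integral
--     # We need: total_positive * scale / anion_charge_abs = integer
--     # So: scale must make (total_positive * scale) divisible by anion_charge_abs
--
--     scale = anion_charge_abs // gcd(total_positive, anion_charge_abs)
--
--     cation_coeffs = [r * scale for r in cation_ratios]
--     anion_coeff = (total_positive * scale) // anion_charge_abs
--
--     # Reduce to smallest integers
--     g = gcd_list(cation_coeffs + [anion_coeff])
--     return [c // g for c in cation_coeffs], anion_coeff // g
-- ===== SOURCE B (Python) =====
-- from math import gcd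
-- from functools import reduce
-- from fractions import Fraction
-- from typing import List, Dict, Tuple
--
--
-- def derive_stoichiometry(
--     cations: List[Dict],
--     anion: Dict
-- ) -> Tuple[List[int], int]:
--     """Balance charges via a rational vector normalized to smallest integers."""
--     q = abs(anion["charge"])
--
--     if all("count" in c for c in cations):
--         # Strict branch: counts given; anion count must come out integral.
--         counts = [c["count"] for c in cations]
--         total = sum(n * c["charge"] for n, c in zip(counts, cations))
--         if total <= 0:
--             raise ValueError("Total cation charge must be positive")
--         if total % q != 0:
--             raise ValueError(
--                 f"Cannot balance charges: total cation charge {total} "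
--                 f"not divisible by anion charge magnitude {q}"
--             )
--         vec = counts + [total // q]
--     else:
--         # Ratio branch: one rational per species, then clear denominators.
--         ratios = [c.get("count", 1) for c in cations]
--         total = sum(r * c["charge"] for r, c in zip(ratios, cations))
--         if total <= 0:
--             raise ValueError("Total cation charge must be positive")
--         fracs = [Fraction(r) for r in ratios] + [Fraction(total, q)]
--         lcm_den = reduce(lambda a, b: a * b // gcd(a, b),
--                          (f.denominator for f in fracs), 1)
--         vec = [f.numerator * (lcm_den // f.denominator) for f in fracs]
--
--     g = reduce(gcd, vec)
--     return [v // g for v in vec[:-1]], vec[-1] // g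
-- ===== Notes on version B (the rewrite author's own statement) =====
-- stated objective: alternative
-- what changed: In the ratio branch B builds a vector of exact fractions (one per cation ratio plus Fraction(total_positive, anion_charge_abs)) and clears it to the smallest integer vector via LCM of denominators, instead of A's explicit scale = q // gcd(total, q) multiplication; both branches then share one final gcd-reduction tail on the assembled vector.
import Mathlib
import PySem

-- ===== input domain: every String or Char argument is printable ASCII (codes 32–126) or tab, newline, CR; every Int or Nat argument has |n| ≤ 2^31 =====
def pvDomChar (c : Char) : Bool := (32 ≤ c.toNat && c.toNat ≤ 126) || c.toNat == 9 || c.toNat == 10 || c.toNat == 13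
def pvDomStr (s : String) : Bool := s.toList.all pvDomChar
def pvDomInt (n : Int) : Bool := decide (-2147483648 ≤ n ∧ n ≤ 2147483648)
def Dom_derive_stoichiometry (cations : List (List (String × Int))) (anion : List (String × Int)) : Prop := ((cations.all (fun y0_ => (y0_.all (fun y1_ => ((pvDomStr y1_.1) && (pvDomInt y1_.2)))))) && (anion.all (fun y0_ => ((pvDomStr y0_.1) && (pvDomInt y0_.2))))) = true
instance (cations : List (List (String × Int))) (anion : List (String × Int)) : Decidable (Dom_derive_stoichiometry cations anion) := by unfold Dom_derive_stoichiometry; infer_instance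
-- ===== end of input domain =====

-- B replaces A's explicit scale-factor arithmetic by a rational (Fraction) vector cleared to
-- smallest integers through one shared LCM-of-denominators / GCD normalization tail; objective:
-- alternative (same cost, different normalization mechanism).

-- ===== PORT A =====

-- gcd_list: reduce(gcd, numbers) (never called on [] under Pre_; 0 is an unreachable placeholder)
def pvGcdList (l : List Int) : Int :=
  match l with
  | [] => 0
  | x :: rest => rest.foldl (fun a b => (Int.gcd a b : Int)) x

def derive_stoichiometry (cations : List (List (String × Int))) (anion : List (String × Int)) : List Int × Int :=
  let q : Int := |(PySem.Dict.mk anion).getD "charge" 0|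
  if cations.all (fun c => ((PySem.Dict.mk c).get? "count").isSome) then
    -- Case 1: counts explicitly provided
    let counts := cations.map (fun c => (PySem.Dict.mk c).getD "count" 0)
    let tp := (cations.map (fun c =>
      (PySem.Dict.mk c).getD "count" 0 * (PySem.Dict.mk c).getD "charge" 0)).sum
    -- ValueError (tp ≤ 0, q ∤ tp) excluded by Pre_
    let anionCount := PySem.Int.floordiv tp q
    let g := pvGcdList (counts ++ [anionCount])
    (counts.map (fun c => PySem.Int.floordiv c g), PySem.Int.floordiv anionCount g)
  else
    -- Case 2: derive from charges with c.get("count", 1) ratios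
    let ratios := cations.foldl (fun acc c => acc ++ [(PySem.Dict.mk c).getD "count" 1]) []
    let tp := ((ratios.zip cations).map (fun p =>
      p.1 * (PySem.Dict.mk p.2).getD "charge" 0)).sum
    let scale := PySem.Int.floordiv q (Int.gcd tp q)
    let coeffs := ratios.map (fun r => r * scale)
    let anionCoeff := PySem.Int.floordiv (tp * scale) q
    let g := pvGcdList (coeffs ++ [anionCoeff])
    (coeffs.map (fun c => PySem.Int.floordiv c g), PySem.Int.floordiv anionCoeff g)

-- ===== PORT B =====

-- fractions.Fraction(a, b) for b ≥ 0, as (numerator, denominator): exact normalization by the gcd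
-- (hand port of the library's reduction; exact for the b > 0 cases B reaches under Pre_)
def pvFrac (a b : Int) : Int × Int :=
  let g := (Int.gcd a b : Int)
  (a / g, b / g)

def derive_stoichiometry_alt (cations : List (List (String × Int))) (anion : List (String × Int)) : List Int × Int :=
  let q : Int := |(PySem.Dict.mk anion).getD "charge" 0|
  let vec : List Int :=
    if cations.all (fun c => ((PySem.Dict.mk c).get? "count").isSome) then
      let counts := cations.map (fun c => (PySem.Dict.mk c).getD "count" 0)
      let total := ((counts.zip cations).map (fun p =>
        p.1 * (PySem.Dict.mk p.2).getD "charge" 0)).sum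
      counts ++ [PySem.Int.floordiv total q]
    else
      let ratios := cations.map (fun c => (PySem.Dict.mk c).getD "count" 1)
      let total := ((ratios.zip cations).map (fun p =>
        p.1 * (PySem.Dict.mk p.2).getD "charge" 0)).sum
      let fracs := ratios.map (fun r => pvFrac r 1) ++ [pvFrac total q]
      let lcmDen := (fracs.map (·.2)).foldl
        (fun a b => PySem.Int.floordiv (a * b) (Int.gcd a b)) 1
      fracs.map (fun f => f.1 * PySem.Int.floordiv lcmDen f.2)
  let g := match vec with
    | [] => 0
    | x :: rest => rest.foldl (fun a b => (Int.gcd a b : Int)) x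
  -- vec[:-1] is dropLast, vec[-1] via pyGetD (vec is nonempty under Pre_)
  (vec.dropLast.map (fun v => PySem.Int.floordiv v g),
   PySem.Int.floordiv (PySem.List.pyGetD vec (-1) 0) g)

-- ===== PRECONDITION & SPEC =====

-- Pre_ excludes exactly the inputs where Python A raises: a missing "charge" key (KeyError),
-- anion charge 0 (ZeroDivisionError), and the two explicit ValueErrors (non-positive total cation
-- charge; in the all-counts branch a total not divisible by the anion charge magnitude).
def Pre_derive_stoichiometry (cations : List (List (String × Int))) (anion : List (String × Int)) : Prop :=
  ((PySem.Dict.mk anion).get? "charge").isSome = true ∧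
  (PySem.Dict.mk anion).getD "charge" 0 ≠ 0 ∧
  (∀ c ∈ cations, ((PySem.Dict.mk c).get? "charge").isSome = true) ∧
  (if cations.all (fun c => ((PySem.Dict.mk c).get? "count").isSome) then
     (0 < (cations.map (fun c =>
        (PySem.Dict.mk c).getD "count" 0 * (PySem.Dict.mk c).getD "charge" 0)).sum ∧
      |(PySem.Dict.mk anion).getD "charge" 0| ∣ (cations.map (fun c =>
        (PySem.Dict.mk c).getD "count" 0 * (PySem.Dict.mk c).getD "charge" 0)).sum)
   else
     0 < (cations.map (fun c =>
        (PySem.Dict.mk c).getD "count" 1 * (PySem.Dict.mk c).getD "charge" 0)).sum)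

instance (cations : List (List (String × Int))) (anion : List (String × Int)) : Decidable (Pre_derive_stoichiometry cations anion) := by
  unfold Pre_derive_stoichiometry; infer_instance

def pvWitness_derive_stoichiometry : (List (List (String × Int))) × (List (String × Int)) :=
  ([[("charge", 2), ("count", 1)], [("charge", 4), ("count", 1)]], [("charge", -2)])

def Spec_derive_stoichiometry (cations : List (List (String × Int))) (anion : List (String × Int)) (out : List Int × Int) : Prop := out = derive_stoichiometry_alt cations anion
instance (cations : List (List (String × Int))) (anion : List (String × Int)) (out : List Int × Int) : Decidable (Spec_derive_stoichiometry cations anion out) := by unfold Spec_derive_stoichiometry; infer_instance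

-- ===== CLAIM (what is proved, stated in full; the proofs are below) =====
def Claim_equal_derive_stoichiometry : Prop := ∀ (cations : List (List (String × Int))) (anion : List (String × Int)), Dom_derive_stoichiometry cations anion → Pre_derive_stoichiometry cations anion → Spec_derive_stoichiometry cations anion (derive_stoichiometry cations anion)

-- ===== LEMMAS AND PROOFS =====

-- zip(map f l, l) mapped by g is a single map over l
theorem pv_zip_map_map {α β γ : Type} (l : List α) (f : α → β) (g : β × α → γ) :
    ((l.map f).zip l).map g = l.map (fun c => g (f c, c)) := by
  induction l with
  | nil => rfl
  | cons x xs ih => simp [ih]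

-- the LCM fold stays 1 over the all-ones denominator prefix
theorem pv_lcm_fold_ones (n : Nat) :
    (List.replicate n (1 : Int)).foldl (fun a b => PySem.Int.floordiv (a * b) (Int.gcd a b)) 1 = 1 := by
  induction n with
  | zero => rfl
  | succ m ih => simpa [PySem.Int.floordiv] using ih

theorem derive_stoichiometry_eq (cations : List (List (String × Int))) (anion : List (String × Int))
    (hpre : Pre_derive_stoichiometry cations anion) :
    derive_stoichiometry cations anion = derive_stoichiometry_alt cations anion := by
  obtain ⟨-, hq0, -, hbr⟩ := hpre
  set q : Int := |(PySem.Dict.mk anion).getD "charge" 0| with hqdef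
  have hq : 0 < q := by
    have := abs_nonneg ((PySem.Dict.mk anion).getD "charge" 0)
    have : q ≠ 0 := by simpa [hqdef, abs_eq_zero] using hq0
    omega
  by_cases hall : cations.all (fun c => ((PySem.Dict.mk c).get? "count").isSome)
  · -- Case 1: both sides build counts ++ [tp // q] and reduce it
    rw [if_pos hall] at hbr
    simp only [derive_stoichiometry, derive_stoichiometry_alt, if_pos hall, ← hqdef,
      pv_zip_map_map cations (fun c => (PySem.Dict.mk c).getD "count" 0)
        (fun p => p.1 * (PySem.Dict.mk p.2).getD "charge" 0)]
    simp [pvGcdList, PySem.List.pyGetD_neg_one_append_singleton]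
  · -- Case 2: B's rational vector equals A's scaled vector
    rw [if_neg hall] at hbr
    have hratios : cations.foldl (fun acc c => acc ++ [(PySem.Dict.mk c).getD "count" 1]) [] =
        cations.map (fun c => (PySem.Dict.mk c).getD "count" 1) := by
      simpa using PySem.List.foldl_append_singleton_eq_map
        (fun c => (PySem.Dict.mk c).getD "count" 1) cations []
    simp only [derive_stoichiometry, derive_stoichiometry_alt, if_neg hall, ← hqdef, hratios]
    set ratios := cations.map (fun c => (PySem.Dict.mk c).getD "count" 1) with hrdef
    set tp := ((ratios.zip cations).map (fun p =>
      p.1 * (PySem.Dict.mk p.2).getD "charge" 0)).sum with htpdef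
    have htp : 0 < tp := by
      rw [htpdef, hrdef, pv_zip_map_map]
      exact hbr
    set g0 : Int := (Int.gcd tp q : Int) with hg0def
    have hg0 : 0 < g0 := by
      have hne : Int.gcd tp q ≠ 0 := by
        simp only [ne_eq, Int.gcd_eq_zero_iff, not_and]
        intro h; omega
      rw [hg0def]
      exact_mod_cast Nat.pos_of_ne_zero hne
    have hg0t : g0 ∣ tp := by rw [hg0def]; exact Int.gcd_dvd_left tp q
    have hg0q : g0 ∣ q := by rw [hg0def]; exact Int.gcd_dvd_right tp q
    obtain ⟨k, hkk⟩ := hg0q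
    have hkpos : 0 < k := by nlinarith
    have hqk : q / g0 = k := by rw [hkk]; exact Int.mul_ediv_cancel_left k (ne_of_gt hg0)
    -- A's scale is the denominator of Fraction(tp, q)
    have hscale : PySem.Int.floordiv q g0 = k := by
      rw [PySem.Int.floordiv_eq_ediv_of_pos hg0]; exact hqk
    -- Fraction normalizations
    have hfr1 : ∀ r : Int, pvFrac r 1 = (r, 1) := fun r => by simp [pvFrac]
    have hfr2 : pvFrac tp q = (tp / g0, k) := by rw [pvFrac, ← hg0def, hqk]
    -- the LCM of the denominators is k
    have hlcm : ((ratios.map (fun r => pvFrac r 1) ++ [pvFrac tp q]).map (·.2)).foldl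
        (fun a b => PySem.Int.floordiv (a * b) (Int.gcd a b)) 1 = k := by
      simp only [hfr2, List.map_append, List.map_map, List.foldl_append]
      have hones : (ratios.map ((·.2) ∘ fun r => pvFrac r 1)) = List.replicate ratios.length 1 := by
        simp [pvFrac, Function.comp_def]
      rw [hones, pv_lcm_fold_ones]
      simp
    -- B's integer vector is A's coeffs ++ [anion_coeff]
    have hanion : PySem.Int.floordiv (tp * k) q = tp / g0 := by
      obtain ⟨m, hm⟩ := hg0t
      rw [PySem.Int.floordiv_eq_ediv_of_pos hq, hkk, hm,
        Int.mul_ediv_cancel_left m (ne_of_gt hg0)]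
      have : g0 * m * k = g0 * k * m := by ring
      rw [this]
      exact Int.mul_ediv_cancel_left m (by nlinarith)
    have hfdself : PySem.Int.floordiv k k = 1 := by
      rw [PySem.Int.floordiv_eq_ediv_of_pos hkpos]; exact Int.ediv_self (by omega)
    have hvec : (ratios.map (fun r => pvFrac r 1) ++ [pvFrac tp q]).map
        (fun f => f.1 * PySem.Int.floordiv (((ratios.map (fun r => pvFrac r 1) ++ [pvFrac tp q]).map (·.2)).foldl
          (fun a b => PySem.Int.floordiv (a * b) (Int.gcd a b)) 1) f.2) =
        ratios.map (fun r => r * k) ++ [tp / g0] := by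
      rw [hlcm]
      simp [hfr1, hfr2, hfdself]
    rw [hvec, hscale, hanion]
    simp [pvGcdList, PySem.List.pyGetD_neg_one_append_singleton]

-- ===== VERDICT (by name: the statement is the Claim_ definition above) =====
theorem derive_stoichiometry_spec : Claim_equal_derive_stoichiometry := by
  intro cations anion _ hpre
  exact derive_stoichiometry_eq cations anion hpre
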